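-- pv_equiv track=rewrite | github.com/bharadwajr567/AWS | practice.py | helper
-- ===== SOURCE A (Python) =====
-- def helper(a, b):
--     num = 0
--     visited = []
--     for l in a:
--         if l not in b:
--             num += 1
--         else:
--             if l not in visited:
--                 if a.count(l) > b.count(l):
--                     num += a.count(l) - b.count(l)
--                     visited.append(l)
--     return num
-- ===== SOURCE B (Python) =====
-- def helper(a, b):
--     num = 0
--     remaining = list(b)
--     for l in a:
--         if l in remaining:
--             remaining.remove(l)
--         else:
--             num += 1
--     return num
-- ===== Notes on version B (the rewrite author's own statement) =====
-- stated objective: faster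
-- what changed: B replaces the visited-list bookkeeping with repeated a.count/b.count calls by a single pass over a that greedily consumes matching occurrences from a mutable copy of b, counting the unmatched elements.
import Mathlib
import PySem

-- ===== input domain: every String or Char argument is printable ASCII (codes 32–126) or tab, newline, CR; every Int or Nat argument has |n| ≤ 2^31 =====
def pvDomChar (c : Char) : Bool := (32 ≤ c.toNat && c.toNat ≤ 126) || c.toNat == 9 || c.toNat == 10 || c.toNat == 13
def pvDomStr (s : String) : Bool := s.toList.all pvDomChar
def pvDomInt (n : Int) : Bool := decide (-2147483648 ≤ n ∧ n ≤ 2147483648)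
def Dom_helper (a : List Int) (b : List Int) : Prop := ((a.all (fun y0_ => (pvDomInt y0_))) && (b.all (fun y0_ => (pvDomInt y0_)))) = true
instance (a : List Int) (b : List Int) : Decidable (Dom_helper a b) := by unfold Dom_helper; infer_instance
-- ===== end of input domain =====

-- B counts unmatched elements of a by greedily consuming a mutable copy of b, instead of
-- A's visited-list with repeated .count calls; same return value, no side effects in either.

-- ===== PORT A =====
-- loop body of A: 'if l not in b: num += 1 else: if l not in visited: if a.count(l) > b.count(l): ...'
def stepA (a : List Int) (b : List Int) (st : Int × List Int) (l : Int) : Int × List Int :=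
  if l ∉ b then (st.1 + 1, st.2)
  else if l ∉ st.2 then
    (if a.count l > b.count l then (st.1 + ((a.count l : Int) - (b.count l : Int)), st.2 ++ [l])
     else st)
  else st

def helper (a : List Int) (b : List Int) : Int :=
  (a.foldl (stepA a b) (0, ([] : List Int))).1

-- ===== PORT B =====
-- loop body of B: 'if l in remaining: remaining.remove(l) else: num += 1'
def stepB (st : Int × List Int) (l : Int) : Int × List Int :=
  if l ∈ st.2 then (st.1, st.2.erase l) else (st.1 + 1, st.2)

def helper_alt (a : List Int) (b : List Int) : Int :=
  (a.foldl stepB (0, b)).1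

-- ===== PRECONDITION & SPEC =====
def Spec_helper (a : List Int) (b : List Int) (out : Int) : Prop := out = helper_alt a b
instance (a : List Int) (b : List Int) (out : Int) : Decidable (Spec_helper a b out) := by unfold Spec_helper; infer_instance

-- ===== CLAIM (what is proved, stated in full; the proofs are below) =====
def Claim_equal_helper : Prop := ∀ (a : List Int) (b : List Int), Dom_helper a b → Spec_helper a b (helper a b)

-- ===== LEMMAS AND PROOFS =====

-- peel the head's summand off a sum over the deduplicated values of a cons list
theorem pv_sum_cons_key (x : Int) (t : List Int) (f g : Int → Int)
    (hagree : ∀ v, v ≠ x → f v = g v) :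
    (∑ v ∈ (x :: t).toFinset, f v)
      = f x + (∑ v ∈ t.toFinset, g v) - (if x ∈ t then g x else 0) := by
  rw [List.toFinset_cons]
  by_cases hx : x ∈ t
  · have hxf : x ∈ t.toFinset := List.mem_toFinset.mpr hx
    rw [Finset.insert_eq_self.mpr hxf, if_pos hx]
    have h1 : ∑ v ∈ t.toFinset.erase x, f v + f x = ∑ v ∈ t.toFinset, f v :=
      Finset.sum_erase_add _ _ hxf
    have h2 : ∑ v ∈ t.toFinset.erase x, g v + g x = ∑ v ∈ t.toFinset, g v :=
      Finset.sum_erase_add _ _ hxf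
    have h3 : ∑ v ∈ t.toFinset.erase x, f v = ∑ v ∈ t.toFinset.erase x, g v :=
      Finset.sum_congr rfl (fun v hv => hagree v (Finset.ne_of_mem_erase hv))
    omega
  · rw [Finset.sum_insert (by simp [hx]), if_neg hx]
    have h3 : ∑ v ∈ t.toFinset, f v = ∑ v ∈ t.toFinset, g v :=
      Finset.sum_congr rfl (fun v hv => hagree v
        (by rintro rfl; exact hx (List.mem_toFinset.mp hv)))
    omega

-- B's loop invariant: the counter gains the per-value excess of the scanned list over the pool
theorem foldB_eq (a : List Int) : ∀ (r : List Int) (n : Int),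
    (a.foldl stepB (n, r)).1
      = n + ∑ v ∈ a.toFinset, max 0 ((a.count v : Int) - (r.count v : Int)) := by
  induction a with
  | nil => intro r n; simp
  | cons x t ih =>
    intro r n
    simp only [List.foldl_cons, stepB]
    rw [pv_sum_cons_key x t
      (fun v => max 0 (((x :: t).count v : Int) - (r.count v : Int)))
      (fun v => max 0 ((t.count v : Int) -
        ((if x ∈ r then r.erase x else r).count v : Int)))
      (fun v hv => by
        dsimp only
        rw [List.count_cons_of_ne (Ne.symm hv)]
        by_cases hx : x ∈ r
        · rw [if_pos hx, List.count_erase_of_ne hv]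
        · rw [if_neg hx])]
    have hcx : (x :: t).count x = t.count x + 1 := List.count_cons_self
    by_cases hx : x ∈ r
    · rw [if_pos hx, ih]
      simp only [if_pos hx]
      have hrc : 1 ≤ r.count x := List.count_pos_iff.mpr hx
      have hec : (r.erase x).count x = r.count x - 1 := List.count_erase_self
      by_cases hxt : x ∈ t
      · rw [if_pos hxt]
        omega
      · rw [if_neg hxt]
        have htc : t.count x = 0 := List.count_eq_zero.mpr hxt
        omega
    · rw [if_neg hx, ih]
      simp only [if_neg hx]
      have hrc : r.count x = 0 := List.count_eq_zero.mpr hx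
      by_cases hxt : x ∈ t
      · rw [if_pos hxt]
        omega
      · rw [if_neg hxt]
        have htc : t.count x = 0 := List.count_eq_zero.mpr hxt
        omega

-- per-value contribution of A's loop while scanning l with visited set vis (a, b fixed)
def phiA (a b l vis : List Int) (v : Int) : Int :=
  if v ∈ b then (if v ∈ vis then 0 else max 0 ((a.count v : Int) - (b.count v : Int)))
  else (l.count v : Int)

-- phiA only depends on the scanned list via counts of values ∉ b
theorem phiA_cons_ne (a b t vis : List Int) (x v : Int) (hvne : v ≠ x) :
    phiA a b (x :: t) vis v = phiA a b t vis v := by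
  unfold phiA
  by_cases hvb : v ∈ b
  · simp [hvb]
  · simp [hvb, List.count_cons_of_ne (Ne.symm hvne)]

-- A's loop invariant
theorem foldA_eq (a b : List Int) : ∀ (l : List Int) (n : Int) (vis : List Int),
    (l.foldl (stepA a b) (n, vis)).1 = n + ∑ v ∈ l.toFinset, phiA a b l vis v := by
  intro l
  induction l with
  | nil => intro n vis; simp
  | cons x t ih =>
    intro n vis
    simp only [List.foldl_cons, stepA]
    by_cases hb : x ∈ b
    · rw [if_neg (not_not_intro hb)]
      by_cases hv : x ∈ vis
      · rw [if_neg (not_not_intro hv), ih]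
        rw [pv_sum_cons_key x t (phiA a b (x :: t) vis) (phiA a b t vis)
          (phiA_cons_ne a b t vis x)]
        have hfx : phiA a b (x :: t) vis x = 0 := by simp [phiA, hb, hv]
        have hgx : phiA a b t vis x = 0 := by simp [phiA, hb, hv]
        rw [hfx, hgx]
        by_cases hxt : x ∈ t <;> simp [hxt]
      · rw [if_pos hv]
        by_cases hgt : b.count x < a.count x
        · rw [if_pos hgt, ih]
          rw [pv_sum_cons_key x t (phiA a b (x :: t) vis) (phiA a b t (vis ++ [x]))
            (fun v hvne => by
              rw [phiA_cons_ne a b t vis x v hvne]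
              unfold phiA
              have hmem : (v ∈ vis ++ [x]) ↔ v ∈ vis := by simp [hvne]
              by_cases hvb : v ∈ b
              · simp [hvb, hmem]
              · simp [hvb])]
          have hfx : phiA a b (x :: t) vis x
              = (a.count x : Int) - (b.count x : Int) := by
            simp only [phiA, if_pos hb, if_neg hv]
            omega
          have hgx : phiA a b t (vis ++ [x]) x = 0 := by
            simp [phiA, hb]
          rw [hfx, hgx]
          by_cases hxt : x ∈ t <;> simp [hxt] <;> ring
        · rw [if_neg hgt, ih]
          rw [pv_sum_cons_key x t (phiA a b (x :: t) vis) (phiA a b t vis)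
            (phiA_cons_ne a b t vis x)]
          have hfx : phiA a b (x :: t) vis x = 0 := by
            simp only [phiA, if_pos hb, if_neg hv]
            omega
          have hgx : phiA a b t vis x = 0 := by
            simp only [phiA, if_pos hb, if_neg hv]
            omega
          rw [hfx, hgx]
          by_cases hxt : x ∈ t <;> simp [hxt]
    · rw [if_pos hb, ih]
      rw [pv_sum_cons_key x t (phiA a b (x :: t) vis) (phiA a b t vis)
        (phiA_cons_ne a b t vis x)]
      have hfx : phiA a b (x :: t) vis x = (t.count x : Int) + 1 := by
        simp [phiA, hb, List.count_cons_self]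
      rw [hfx]
      by_cases hxt : x ∈ t
      · rw [if_pos hxt]
        have hgx : phiA a b t vis x = (t.count x : Int) := by simp [phiA, hb]
        rw [hgx]; ring
      · rw [if_neg hxt]
        have htc : t.count x = 0 := List.count_eq_zero.mpr hxt
        simp [htc]
        ring

-- ===== VERDICT (by name: the statement is the Claim_ definition above) =====
theorem helper_spec : Claim_equal_helper := by
  intro a b _
  unfold Spec_helper helper helper_alt
  rw [foldA_eq a b a 0 [], foldB_eq a b 0]
  have h : ∀ v ∈ a.toFinset, phiA a b a [] v
      = max 0 ((a.count v : Int) - (b.count v : Int)) := by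
    intro v hv
    unfold phiA
    by_cases hvb : v ∈ b
    · simp [hvb]
    · have hbc : b.count v = 0 := List.count_eq_zero.mpr hvb
      have hac : 1 ≤ a.count v := List.count_pos_iff.mpr (List.mem_toFinset.mp hv)
      simp only [if_neg hvb, hbc]
      omega
  rw [Finset.sum_congr rfl h]
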